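-- pv_equiv track=rewrite | github.com/delaramrab/delaram | compare.py | compare_two_string
-- ===== SOURCE A (Python) =====
-- def compare_two_string(string_1: str, string_2: str) -> str:
--     while len(string_1) != 0 and string_2:
--         if string_1[0] > string_2[0]:
--             string_2 = string_2[1:]
--         elif string_1[0] == string_2[0]:
--             string_2 = string_2[1:]
--             string_1 = string_1[1:]
--         else:
--             string_1 = string_1[1:]
--
--         if string_1 and len(string_2) != 0:
--             string_1 = string_1[::-1]
--             string_2 = string_2[::-1]
--
--     if string_1 or string_2:
--         return string_1 + string_2
--     else:
--         return "both of two strings are empty"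
-- ===== SOURCE B (Python) =====
-- def compare_two_string(string_1: str, string_2: str) -> str:
--     # Two-pointer simulation: each string is represented by a window [lo, hi)
--     # into the original string plus one shared direction flag 'rev' that says
--     # whether both windows are currently read reversed.  Each loop step is O(1).
--     s1, s2 = string_1, string_2
--     lo1, hi1 = 0, len(s1)
--     lo2, hi2 = 0, len(s2)
--     rev = False
--     while lo1 < hi1 and lo2 < hi2:
--         c1 = s1[hi1 - 1] if rev else s1[lo1]
--         c2 = s2[hi2 - 1] if rev else s2[lo2]
--         if c1 > c2:
--             if rev:
--                 hi2 -= 1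
--             else:
--                 lo2 += 1
--         elif c1 == c2:
--             if rev:
--                 hi1 -= 1
--                 hi2 -= 1
--             else:
--                 lo1 += 1
--                 lo2 += 1
--         else:
--             if rev:
--                 hi1 -= 1
--             else:
--                 lo1 += 1
--         if lo1 < hi1 and lo2 < hi2:
--             rev = not rev
--     r1 = s1[lo1:hi1]
--     r2 = s2[lo2:hi2]
--     if rev:
--         r1 = r1[::-1]
--         r2 = r2[::-1]
--     if r1 or r2:
--         return r1 + r2
--     return "both of two strings are empty"
-- ===== Notes on version B (the rewrite author's own statement) =====
-- stated objective: faster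
-- what changed: Replaces A's repeated string slicing and full reversals (O(n) per loop step) by a two-pointer window [lo,hi) on each original string with one shared direction flag toggled instead of reversing, making each step O(1).
import Mathlib
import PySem

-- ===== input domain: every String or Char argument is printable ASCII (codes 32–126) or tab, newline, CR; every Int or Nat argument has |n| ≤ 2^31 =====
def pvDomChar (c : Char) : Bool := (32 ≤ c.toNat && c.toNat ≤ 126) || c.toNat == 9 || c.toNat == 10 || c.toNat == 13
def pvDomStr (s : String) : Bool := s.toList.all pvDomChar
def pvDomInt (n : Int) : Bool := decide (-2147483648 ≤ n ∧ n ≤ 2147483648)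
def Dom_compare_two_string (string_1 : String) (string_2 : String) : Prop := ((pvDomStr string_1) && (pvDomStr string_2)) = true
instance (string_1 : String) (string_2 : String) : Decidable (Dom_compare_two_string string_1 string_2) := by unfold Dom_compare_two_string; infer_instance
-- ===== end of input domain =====

-- B replaces A's per-iteration string slicing and full reversals by an O(1)-per-step
-- two-pointer window on each original string with a shared direction flag (objective: faster).


-- ===== PORT A =====
-- A's while loop over the two character lists: the same comparison of first characters,
-- the same drops, and the same full reversals of both lists, step for step.
-- fuel = (total remaining length) is a pure totality guard: each iteration of A's
-- while loop shortens the combined length by at least 1, so the fuel never runs out.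
def pvLoopA : Nat → List Char → List Char → List Char × List Char
  | fuel + 1, a :: t1, b :: t2 =>
      if b < a then
        if (a :: t1) ≠ [] ∧ t2 ≠ [] then pvLoopA fuel (a :: t1).reverse t2.reverse
        else (a :: t1, t2)
      else if a = b then
        if t1 ≠ [] ∧ t2 ≠ [] then pvLoopA fuel t1.reverse t2.reverse
        else (t1, t2)
      else
        if t1 ≠ [] ∧ (b :: t2) ≠ [] then pvLoopA fuel t1.reverse (b :: t2).reverse
        else (t1, b :: t2)
  | _, l1, l2 => (l1, l2)

def compare_two_string (string_1 : String) (string_2 : String) : String :=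
  let r := pvLoopA (string_1.toList.length + string_2.toList.length)
    string_1.toList string_2.toList
  if r.1 ≠ [] ∨ r.2 ≠ [] then String.ofList (r.1 ++ r.2)
  else "both of two strings are empty"

-- ===== PORT B =====
-- Source B's "if rev: hi -= 1 else: lo += 1" (drop the current front of one window)
def pvDrop (rev : Bool) (lo hi : Nat) : Nat × Nat :=
  if rev then (lo, hi - 1) else (lo + 1, hi)

-- Source B's while loop: two windows [lo,hi) plus the shared direction flag 'rev';
-- the loop invariant keeps every index in range, so List.getD is exact for s[i].
-- fuel = combined window size, again only a totality guard (each step shrinks it by 1)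
def pvLoopB (s1 s2 : List Char) : Nat → Nat → Nat → Nat → Nat → Bool →
    Nat × Nat × Nat × Nat × Bool
  | fuel + 1, lo1, hi1, lo2, hi2, rev =>
    if lo1 < hi1 ∧ lo2 < hi2 then
      let c1 := if rev then s1.getD (hi1 - 1) ' ' else s1.getD lo1 ' '
      let c2 := if rev then s2.getD (hi2 - 1) ' ' else s2.getD lo2 ' '
      let p : (Nat × Nat) × (Nat × Nat) :=
        if c2 < c1 then ((lo1, hi1), pvDrop rev lo2 hi2)
        else if c1 = c2 then (pvDrop rev lo1 hi1, pvDrop rev lo2 hi2)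
        else (pvDrop rev lo1 hi1, (lo2, hi2))
      if p.1.1 < p.1.2 ∧ p.2.1 < p.2.2 then
        pvLoopB s1 s2 fuel p.1.1 p.1.2 p.2.1 p.2.2 (!rev)
      else (p.1.1, p.1.2, p.2.1, p.2.2, rev)
    else (lo1, hi1, lo2, hi2, rev)
  | 0, lo1, hi1, lo2, hi2, rev => (lo1, hi1, lo2, hi2, rev)

def compare_two_string_alt (string_1 : String) (string_2 : String) : String :=
  let l1 := string_1.toList
  let l2 := string_2.toList
  match pvLoopB l1 l2 (l1.length + l2.length) 0 l1.length 0 l2.length false with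
  | (lo1, hi1, lo2, hi2, rev) =>
    -- s[lo:hi] for 0 ≤ lo ≤ hi ≤ len is exactly drop-then-take
    let t1 := (l1.drop lo1).take (hi1 - lo1)
    let t2 := (l2.drop lo2).take (hi2 - lo2)
    let r1 := if rev then t1.reverse else t1
    let r2 := if rev then t2.reverse else t2
    if r1 ≠ [] ∨ r2 ≠ [] then String.ofList (r1 ++ r2)
    else "both of two strings are empty"

-- ===== PRECONDITION & SPEC =====
def Spec_compare_two_string (string_1 : String) (string_2 : String) (out : String) : Prop := out = compare_two_string_alt string_1 string_2
instance (string_1 : String) (string_2 : String) (out : String) : Decidable (Spec_compare_two_string string_1 string_2 out) := by unfold Spec_compare_two_string; infer_instance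

-- ===== CLAIM (what is proved, stated in full; the proofs are below) =====
def Claim_equal_compare_two_string : Prop := ∀ (string_1 : String) (string_2 : String), Dom_compare_two_string string_1 string_2 → Spec_compare_two_string string_1 string_2 (compare_two_string string_1 string_2)

-- ===== LEMMAS AND PROOFS =====

-- the character list B's window (lo, hi, rev) denotes
def pvView (s : List Char) (lo hi : Nat) (rev : Bool) : List Char :=
  if rev then ((s.drop lo).take (hi - lo)).reverse else (s.drop lo).take (hi - lo)

theorem pvView_empty (s : List Char) (lo hi : Nat) (rev : Bool) (h : ¬ lo < hi) :
    pvView s lo hi rev = [] := by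
  have : hi - lo = 0 := by omega
  cases rev <;> simp [pvView, this]

theorem pvView_ne_nil (s : List Char) (lo hi : Nat) (rev : Bool)
    (hlo : lo < hi) (hhi : hi ≤ s.length) : pvView s lo hi rev ≠ [] := by
  have hl : (pvView s lo hi rev).length = min (hi - lo) (s.length - lo) := by
    cases rev <;> simp [pvView]
  intro hc
  rw [hc] at hl
  simp at hl
  omega

theorem pvView_ne_nil_iff (s : List Char) (lo hi : Nat) (rev : Bool)
    (hhi : hi ≤ s.length) : pvView s lo hi rev ≠ [] ↔ lo < hi := by
  constructor
  · intro h
    by_contra hc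
    exact h (pvView_empty s lo hi rev hc)
  · intro h
    exact pvView_ne_nil s lo hi rev h hhi

theorem pvView_not (s : List Char) (lo hi : Nat) (rev : Bool) :
    pvView s lo hi (!rev) = (pvView s lo hi rev).reverse := by
  cases rev <;> simp [pvView]

theorem pvView_cons_false (s : List Char) (lo hi : Nat)
    (hlo : lo < hi) (hhi : hi ≤ s.length) :
    pvView s lo hi false = s.getD lo ' ' :: pvView s (lo + 1) hi false := by
  have hlt : lo < s.length := lt_of_lt_of_le hlo hhi
  have hstep : hi - lo = (hi - (lo + 1)) + 1 := by omega
  rw [pvView, pvView, if_neg (by simp), if_neg (by simp), hstep,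
     List.drop_eq_getElem_cons hlt, List.take_succ_cons, List.getD_eq_getElem s ' ' hlt]

theorem pvView_cons_true (s : List Char) (lo hi : Nat)
    (hlo : lo < hi) (hhi : hi ≤ s.length) :
    pvView s lo hi true = s.getD (hi - 1) ' ' :: pvView s lo (hi - 1) true := by
  have hlt : hi - 1 < s.length := by omega
  have hstep : hi - lo = (hi - 1 - lo) + 1 := by omega
  have hidx : (s.drop lo)[hi - 1 - lo]? = some s[hi - 1] := by
    rw [List.getElem?_drop]
    have : lo + (hi - 1 - lo) = hi - 1 := by omega
    rw [this, List.getElem?_eq_getElem hlt]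
  simp [pvView, hstep, List.take_add_one, hidx, List.getElem?_eq_getElem hlt, List.getD]

theorem pvView_cons (s : List Char) (lo hi : Nat) (rev : Bool)
    (hlo : lo < hi) (hhi : hi ≤ s.length) :
    pvView s lo hi rev =
      (if rev then s.getD (hi - 1) ' ' else s.getD lo ' ') ::
        pvView s (pvDrop rev lo hi).1 (pvDrop rev lo hi).2 rev := by
  cases rev
  · simpa [pvDrop] using pvView_cons_false s lo hi hlo hhi
  · simpa [pvDrop] using pvView_cons_true s lo hi hlo hhi

theorem pvLoopA_nil_left (f : Nat) (l : List Char) : pvLoopA f [] l = ([], l) := by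
  cases f <;> cases l <;> simp [pvLoopA]

theorem pvLoopA_nil_right (f : Nat) (l : List Char) : pvLoopA f l [] = (l, []) := by
  cases f <;> cases l <;> simp [pvLoopA]

theorem pvDrop_sub (rev : Bool) (lo hi : Nat) :
    (pvDrop rev lo hi).2 - (pvDrop rev lo hi).1 = hi - lo - 1 := by
  cases rev <;> simp [pvDrop] <;> omega

theorem pvDrop_le (rev : Bool) (lo hi : Nat) : (pvDrop rev lo hi).2 ≤ hi := by
  cases rev <;> simp [pvDrop]

theorem pvLoop_eq (n : Nat) (s1 s2 : List Char) (lo1 hi1 lo2 hi2 : Nat) (rev : Bool)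
    (hn : (hi1 - lo1) + (hi2 - lo2) ≤ n)
    (h1 : hi1 ≤ s1.length) (h2 : hi2 ≤ s2.length) :
    pvLoopA n (pvView s1 lo1 hi1 rev) (pvView s2 lo2 hi2 rev) =
      (match pvLoopB s1 s2 n lo1 hi1 lo2 hi2 rev with
       | (a1, b1, a2, b2, r) => (pvView s1 a1 b1 r, pvView s2 a2 b2 r)) := by
  induction n generalizing lo1 hi1 lo2 hi2 rev with
  | zero => rfl
  | succ n ih =>
    by_cases h : lo1 < hi1 ∧ lo2 < hi2
    · obtain ⟨hc1, hc2⟩ := h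
      rw [pvLoopB, if_pos ⟨hc1, hc2⟩]
      rw [pvView_cons s1 lo1 hi1 rev hc1 h1, pvView_cons s2 lo2 hi2 rev hc2 h2]
      rw [pvLoopA]
      set c1 := (if rev = true then s1.getD (hi1 - 1) ' ' else s1.getD lo1 ' ') with hcd1
      set c2 := (if rev = true then s2.getD (hi2 - 1) ' ' else s2.getD lo2 ' ') with hcd2
      set q1 := pvDrop rev lo1 hi1 with hqd1
      set q2 := pvDrop rev lo2 hi2 with hqd2
      have hq1s : q1.2 - q1.1 = hi1 - lo1 - 1 := pvDrop_sub rev lo1 hi1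
      have hq2s : q2.2 - q2.1 = hi2 - lo2 - 1 := pvDrop_sub rev lo2 hi2
      have hb1 : q1.2 ≤ s1.length := le_trans (pvDrop_le rev lo1 hi1) h1
      have hb2 : q2.2 ≤ s2.length := le_trans (pvDrop_le rev lo2 hi2) h2
      by_cases hcmp : c2 < c1
      · simp only [if_pos hcmp, ne_eq, reduceCtorEq, not_false_eq_true, true_and,
          pvView_ne_nil_iff s2 q2.1 q2.2 rev hb2]
        rw [← pvView_cons s1 lo1 hi1 rev hc1 h1]
        by_cases hne : q2.1 < q2.2
        · simp only [if_pos hne, if_pos (And.intro hc1 hne)]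
          rw [← pvView_not, ← pvView_not]
          exact ih lo1 hi1 q2.1 q2.2 (!rev) (by omega) h1 hb2
        · rw [if_neg hne, if_neg (show ¬ (lo1 < hi1 ∧ q2.1 < q2.2) from fun hx => hne hx.2)]
      · by_cases heq : c1 = c2
        · simp only [if_neg hcmp, if_pos heq, ne_eq,
            pvView_ne_nil_iff s1 q1.1 q1.2 rev hb1, pvView_ne_nil_iff s2 q2.1 q2.2 rev hb2]
          by_cases hne : q1.1 < q1.2 ∧ q2.1 < q2.2
          · simp only [if_pos hne]
            rw [← pvView_not, ← pvView_not]
            exact ih q1.1 q1.2 q2.1 q2.2 (!rev) (by omega) hb1 hb2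
          · rw [if_neg hne, if_neg hne]
        · simp only [if_neg hcmp, if_neg heq, ne_eq, reduceCtorEq, not_false_eq_true, and_true,
            pvView_ne_nil_iff s1 q1.1 q1.2 rev hb1]
          rw [← pvView_cons s2 lo2 hi2 rev hc2 h2]
          by_cases hne : q1.1 < q1.2
          · simp only [if_pos hne, if_pos (And.intro hne hc2)]
            rw [← pvView_not, ← pvView_not]
            exact ih q1.1 q1.2 lo2 hi2 (!rev) (by omega) hb1 h2
          · rw [if_neg hne, if_neg (show ¬ (q1.1 < q1.2 ∧ lo2 < hi2) from fun hx => hne hx.1)]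
    · rw [pvLoopB, if_neg h]
      rcases not_and_or.mp h with h' | h'
      · simp [pvView_empty s1 lo1 hi1 rev h', pvLoopA_nil_left]
      · simp [pvView_empty s2 lo2 hi2 rev h', pvLoopA_nil_right]

-- ===== VERDICT (by name: the statement is the Claim_ definition above) =====
theorem pvView_full (l : List Char) : pvView l 0 l.length false = l := by
  simp [pvView]

theorem compare_two_string_spec : Claim_equal_compare_two_string := by
  intro string_1 string_2 _
  show compare_two_string string_1 string_2 = compare_two_string_alt string_1 string_2
  have h := pvLoop_eq (string_1.toList.length + string_2.toList.length)
    string_1.toList string_2.toList 0 string_1.toList.length 0 string_2.toList.length false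
    (by omega) le_rfl le_rfl
  rw [pvView_full, pvView_full] at h
  rcases hE : pvLoopB string_1.toList string_2.toList
      (string_1.toList.length + string_2.toList.length) 0 string_1.toList.length 0
      string_2.toList.length false with ⟨a1, b1, a2, b2, r⟩
  rw [hE] at h
  simp only [compare_two_string, compare_two_string_alt, hE, h, pvView]
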